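-- pv_equiv track=rewrite | github.com/zhouzhousc/11python- | 130道代码/4.字符串方法实现篇/my_capitalize.py | my_capitalize
-- ===== SOURCE A (Python) =====
-- def my_capitalize(string):
--     if not string:
--         return string
--
--     lst = []
--     for index, item in enumerate(string):
--         ascii_index = ord(item)
--         if index == 0:
--             if 97 <= ascii_index <= 122:
--                 item = chr(ascii_index - 32)
--         else:
--             if 65 <= ascii_index <= 90:
--                 item = chr(ascii_index + 32)
--         lst.append(item)
--
--     return "".join(lst)
-- ===== SOURCE B (Python) =====
-- def my_capitalize(string):
--     if not string:
--         return string
--     upper = {c: c - 32 for c in range(97, 123)}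
--     lower = {c: c + 32 for c in range(65, 91)}
--     return string[0].translate(upper) + string[1:].translate(lower)
-- ===== Notes on version B (the rewrite author's own statement) =====
-- stated objective: idiomatic
-- what changed: Replaces the index-tracking char-by-char ord/chr loop with two ASCII translation tables applied in bulk via str.translate to the first character and the rest.
import Mathlib
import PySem

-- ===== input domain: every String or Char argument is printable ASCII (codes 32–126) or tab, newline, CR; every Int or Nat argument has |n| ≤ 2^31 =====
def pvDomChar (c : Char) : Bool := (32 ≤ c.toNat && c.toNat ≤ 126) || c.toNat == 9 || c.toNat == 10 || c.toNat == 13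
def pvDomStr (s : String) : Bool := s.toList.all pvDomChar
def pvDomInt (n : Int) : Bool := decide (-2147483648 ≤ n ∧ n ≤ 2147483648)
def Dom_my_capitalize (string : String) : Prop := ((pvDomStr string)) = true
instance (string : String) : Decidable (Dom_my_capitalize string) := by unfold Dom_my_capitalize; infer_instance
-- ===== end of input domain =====

-- B replaces A's index-tracking ord/chr loop by two ASCII translation tables applied via str.translate (idiomatic rewrite, same cost).


-- ===== PORT A =====
-- per-character body of A's loop: ord/chr with the index-0 test
def pvItemA (p : Int × Char) : Char :=
  let asciiIndex : Int := (p.2.toNat : Int)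
  if p.1 == 0 then
    if 97 ≤ asciiIndex ∧ asciiIndex ≤ 122 then Char.ofNat (asciiIndex - 32).toNat else p.2
  else
    if 65 ≤ asciiIndex ∧ asciiIndex ≤ 90 then Char.ofNat (asciiIndex + 32).toNat else p.2

def my_capitalize (string : String) : String :=
  if string.toList = [] then string
  else
    let lst := (PySem.List.enumerate string.toList 0).foldl (fun lst p => lst ++ [pvItemA p]) []
    String.ofList (PySem.Chars.join [] (lst.map (fun c => [c])))

-- ===== PORT B =====
-- str.translate with an int→int table: exact hand port (each code point looked up; absent keys unchanged)
def pvTranslate (table : PySem.Dict Int Int) (cs : List Char) : List Char :=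
  cs.map (fun c =>
    match table.get? ((c.toNat : Int)) with
    | some v => Char.ofNat v.toNat
    | none => c)

def my_capitalize_alt (string : String) : String :=
  let upper := (PySem.List.pyRange 97 123 1).foldl (fun d c => d.insert c (c - 32)) PySem.Dict.empty
  let lower := (PySem.List.pyRange 65 91 1).foldl (fun d c => d.insert c (c + 32)) PySem.Dict.empty
  match string.toList with
  | [] => string
  | c :: rest => String.ofList (pvTranslate upper [c] ++ pvTranslate lower rest)

-- ===== PRECONDITION & SPEC =====
def Spec_my_capitalize (string : String) (out : String) : Prop := out = my_capitalize_alt string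
instance (string : String) (out : String) : Decidable (Spec_my_capitalize string out) := by unfold Spec_my_capitalize; infer_instance

-- ===== CLAIM (what is proved, stated in full; the proofs are below) =====
def Claim_equal_my_capitalize : Prop := ∀ (string : String), Dom_my_capitalize string → Spec_my_capitalize string (my_capitalize string)

-- ===== LEMMAS AND PROOFS =====
lemma pv_get_range (off : Int) : ∀ (m : Nat) (a b n : Int), b = a + m →
    ((PySem.List.pyRange a b 1).foldl (fun d c => d.insert c (c + off)) PySem.Dict.empty).get? n
      = if a ≤ n ∧ n < b then some (n + off) else none := by
  intro m
  induction m with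
  | zero =>
      intro a b n hb
      rw [PySem.List.pyRange_one_eq_nil (by omega), List.foldl_nil, PySem.Dict.get?_empty,
        if_neg (by omega)]
  | succ m ih =>
      intro a b n hb
      have hb' : b = (a + (m : Int)) + 1 := by push_cast at hb ⊢; omega
      rw [hb', PySem.List.pyRange_one_succ_right (by omega), List.foldl_append, List.foldl_cons,
        List.foldl_nil, PySem.Dict.get?_insert, ih a (a + (m : Int)) n rfl]
      by_cases hn : n = a + (m : Int)
      · rw [if_pos hn, if_pos (by omega), hn]
      · rw [if_neg hn]
        by_cases h2 : a ≤ n ∧ n < a + (m : Int)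
        · rw [if_pos h2, if_pos (by omega)]
        · rw [if_neg h2, if_neg (by omega)]

lemma pv_get_upper (n : Int) :
    ((PySem.List.pyRange 97 123 1).foldl (fun d c => d.insert c (c - 32)) PySem.Dict.empty).get? n
      = if 97 ≤ n ∧ n ≤ 122 then some (n - 32) else none := by
  have hf : (fun (d : PySem.Dict Int Int) (c : Int) => d.insert c (c - 32))
      = fun d c => d.insert c (c + (-32)) := by funext d c; rw [Int.sub_eq_add_neg]
  rw [hf, pv_get_range (-32) 26 97 123 n (by norm_num)]
  by_cases hc : 97 ≤ n ∧ n ≤ 122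
  · rw [if_pos (by omega), if_pos hc]; congr 1
  · rw [if_neg (by omega), if_neg hc]

lemma pv_get_lower (n : Int) :
    ((PySem.List.pyRange 65 91 1).foldl (fun d c => d.insert c (c + 32)) PySem.Dict.empty).get? n
      = if 65 ≤ n ∧ n ≤ 90 then some (n + 32) else none := by
  rw [pv_get_range 32 26 65 91 n (by norm_num)]
  by_cases hc : 65 ≤ n ∧ n ≤ 90
  · rw [if_pos (by omega), if_pos hc]
  · rw [if_neg (by omega), if_neg hc]

lemma pv_tail_foldl (xs : List Char) :
    ∀ (s : Int) (acc : List Char), 1 ≤ s →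
      (PySem.List.enumerate xs s).foldl (fun lst p => lst ++ [pvItemA p]) acc
        = acc ++ xs.map (fun c =>
            if 65 ≤ (c.toNat : Int) ∧ (c.toNat : Int) ≤ 90 then Char.ofNat ((c.toNat : Int) + 32).toNat else c) := by
  induction xs with
  | nil => intro s acc _; simp [PySem.List.enumerate_nil]
  | cons x xs ih =>
      intro s acc hs
      rw [PySem.List.enumerate_cons, List.foldl_cons, ih (s + 1) _ (by omega)]
      have hsne : (s == 0) = false := by simp; omega
      simp [pvItemA, hsne]

-- ===== VERDICT (by name: the statement is the Claim_ definition above) =====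
theorem my_capitalize_spec : Claim_equal_my_capitalize := by
  intro string _
  unfold Spec_my_capitalize my_capitalize my_capitalize_alt
  cases h : string.toList with
  | nil => simp
  | cons c rest =>
      simp only [reduceCtorEq, if_false, PySem.List.enumerate_cons, List.foldl_cons,
        List.nil_append, zero_add]
      rw [pv_tail_foldl rest 1 [pvItemA (0, c)] (by omega), PySem.Chars.join_nil_singletons]
      simp only [pvTranslate, List.map_cons, List.map_nil, pv_get_upper, pv_get_lower,
        List.cons_append, List.nil_append]
      congr 1
      congr 1
      · by_cases h97 : 97 ≤ c.toNat ∧ c.toNat ≤ 122 <;>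
          simp [pvItemA, h97]
      · apply List.map_congr_left
        intro x _
        by_cases h65 : 65 ≤ x.toNat ∧ x.toNat ≤ 90 <;> simp [h65]
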